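-- pv_equiv track=rewrite | github.com/prangel-git/anansi | utils/src/purse.py | break_string
-- ===== SOURCE A (Python) =====
-- def is_letter(character):
--     return ("a" <= character and character <= "z") or (
--         "A" <= character and character <= "Z"
--     )
--
-- def break_string(string):
--
--     if not string:
--         return []
--
--     if not is_letter(string[0]):
--         return [string[0]] + break_string(string[1:])
--
--     current_word = ""
--     for character in string:
--         if is_letter(character):
--             current_word += character
--         else:
--             break
--
--     return [current_word] + break_string(string[len(current_word) :])
-- ===== SOURCE B (Python) =====
-- from itertools import groupby
--
-- def is_letter(character):
--     return ("a" <= character and character <= "z") or (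
--         "A" <= character and character <= "Z"
--     )
--
-- def break_string(string):
--     result = []
--     for letter_run, chars in groupby(string, key=is_letter):
--         if letter_run:
--             result.append("".join(chars))
--         else:
--             result.extend(chars)
--     return result
-- ===== Notes on version B (the rewrite author's own statement) =====
-- stated objective: idiomatic
-- what changed: Replaces A's self-recursion on string suffixes (re-scanning the leading letter run with an inner loop) by a single itertools.groupby pass over maximal same-letterness runs, joining letter runs and expanding non-letter runs char by char.
import Mathlib
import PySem

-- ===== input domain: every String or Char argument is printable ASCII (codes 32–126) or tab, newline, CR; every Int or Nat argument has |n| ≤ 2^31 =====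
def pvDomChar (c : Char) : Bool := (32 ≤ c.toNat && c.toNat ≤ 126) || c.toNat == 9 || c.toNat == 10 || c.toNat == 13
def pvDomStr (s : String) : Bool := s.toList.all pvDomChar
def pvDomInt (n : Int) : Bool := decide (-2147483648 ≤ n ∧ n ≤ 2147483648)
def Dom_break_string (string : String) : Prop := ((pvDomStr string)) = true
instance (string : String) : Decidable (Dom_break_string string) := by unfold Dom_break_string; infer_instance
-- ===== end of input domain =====

-- B replaces A's self-recursion on string suffixes by a single groupby pass over
-- maximal same-letterness runs (objective: idiomatic); return values agree on all inputs.

-- ===== PORT A =====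
def pvIsLetter (c : Char) : Bool :=
  (('a' ≤ c) && (c ≤ 'z')) || (('A' ≤ c) && (c ≤ 'Z'))

-- A's for-loop with break: collect leading letters into current_word
def pvCollectWord : List Char → List Char
  | [] => []
  | c :: cs => if pvIsLetter c then c :: pvCollectWord cs else []

def pvBreakA : List Char → List String
  | [] => []
  | c :: cs =>
    if ¬ pvIsLetter c then
      [String.ofList [c]] ++ pvBreakA cs
    else
      let w := pvCollectWord (c :: cs)
      [String.ofList w] ++ pvBreakA (List.drop w.length (c :: cs))
termination_by l => l.length
decreasing_by
  · simp
  · rename_i h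
    have hc : pvIsLetter c = true := not_not.mp h
    show (List.drop (pvCollectWord (c :: cs)).length (c :: cs)).length < (c :: cs).length
    have h1 : 1 ≤ (pvCollectWord (c :: cs)).length := by simp [pvCollectWord, hc]
    simp only [List.length_drop, List.length_cons]
    omega

def break_string (string : String) : List String := pvBreakA string.toList

-- ===== PORT B =====
-- itertools.groupby(string, key=is_letter): maximal runs of equal key, in order
def pvRuns : List Char → List (Bool × List Char)
  | [] => []
  | c :: cs =>
    let k := pvIsLetter c
    (k, c :: cs.takeWhile (fun d => pvIsLetter d == k)) ::
      pvRuns (cs.dropWhile (fun d => pvIsLetter d == k))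
termination_by l => l.length
decreasing_by
  have := List.length_dropWhile_le (fun d => pvIsLetter d == pvIsLetter c) cs
  simp; omega

def pvBreakB (l : List Char) : List String :=
  (pvRuns l).flatMap (fun g =>
    if g.1 then [String.ofList g.2] else g.2.map (fun d => String.ofList [d]))

def break_string_alt (string : String) : List String := pvBreakB string.toList

-- ===== PRECONDITION & SPEC =====
def Spec_break_string (string : String) (out : List String) : Prop := out = break_string_alt string
instance (string : String) (out : List String) : Decidable (Spec_break_string string out) := by unfold Spec_break_string; infer_instance

-- ===== CLAIM (what is proved, stated in full; the proofs are below) =====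
def Claim_equal_break_string : Prop := ∀ (string : String), Dom_break_string string → Spec_break_string string (break_string string)

-- ===== LEMMAS AND PROOFS =====

theorem pvCollectWord_eq_takeWhile (l : List Char) :
    pvCollectWord l = l.takeWhile pvIsLetter := by
  induction l with
  | nil => simp [pvCollectWord]
  | cons c cs ih => by_cases h : pvIsLetter c <;> simp [pvCollectWord, h, ih]

theorem pv_drop_takeWhile {α : Type} (p : α → Bool) (l : List α) :
    List.drop (l.takeWhile p).length l = l.dropWhile p := by
  induction l with
  | nil => simp
  | cons a l ih =>
    by_cases h : p a <;> simp [h, ih]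

-- one unfold of B on a non-letter head: the whole non-letter run expands to singletons
theorem pvBreakB_nonletter (cs : List Char) :
    (cs.takeWhile (fun d => pvIsLetter d == false)).map (fun d => String.ofList [d]) ++
      pvBreakB (cs.dropWhile (fun d => pvIsLetter d == false)) = pvBreakB cs := by
  cases cs with
  | nil => simp [pvBreakB, pvRuns]
  | cons d ds =>
    by_cases hd : pvIsLetter d = true
    · simp [hd]
    · simp only [Bool.not_eq_true] at hd
      simp [pvBreakB, pvRuns, hd]

theorem pv_main : ∀ n (l : List Char), l.length ≤ n → pvBreakA l = pvBreakB l := by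
  intro n
  induction n with
  | zero => intro l hl; simp at hl; simp [hl, pvBreakA, pvBreakB, pvRuns]
  | succ n ih =>
    intro l hl
    cases l with
    | nil => simp [pvBreakA, pvBreakB, pvRuns]
    | cons c cs =>
      simp only [List.length_cons] at hl
      by_cases hc : pvIsLetter c = true
      · -- letter head: A takes the whole letter run, so does B's first group
        have hw : pvCollectWord (c :: cs) = c :: cs.takeWhile pvIsLetter := by
          simp [pvCollectWord_eq_takeWhile, hc]
        have hdrop : List.drop (c :: cs.takeWhile pvIsLetter).length (c :: cs)
            = cs.dropWhile pvIsLetter := by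
          simpa using pv_drop_takeWhile pvIsLetter cs
        have hkey' : (fun d => pvIsLetter d == true) = pvIsLetter := by
          funext d; simp
        rw [pvBreakA, if_neg (by simp [hc])]
        rw [pvBreakB]; rw [pvRuns]
        simp only [hc, hkey', List.flatMap_cons]
        rw [hw, hdrop]
        have hlen : (cs.dropWhile pvIsLetter).length ≤ n := by
          have := List.length_dropWhile_le pvIsLetter cs; omega
        simp [ih _ hlen, pvBreakB]
      · -- non-letter head: A peels one char; B's run expands char by char
        simp only [Bool.not_eq_true] at hc
        rw [pvBreakA, if_pos (by simp [hc])]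
        rw [ih cs (by omega)]
        have hkey : (fun d => pvIsLetter d == pvIsLetter c) = (fun d => pvIsLetter d == false) := by
          funext d; simp [hc]
        rw [← pvBreakB_nonletter cs]
        conv_rhs => rw [pvBreakB, pvRuns]
        simp [hc, pvBreakB]

-- ===== VERDICT (by name: the statement is the Claim_ definition above) =====
theorem break_string_spec : Claim_equal_break_string := by
  intro s _
  unfold Spec_break_string break_string break_string_alt
  exact pv_main s.toList.length s.toList le_rfl
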